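-- pv_equiv track=rewrite | github.com/chobojajg/codequiz | 프로그래머스/2/148653. 마법의 엘리베이터/마법의 엘리베이터.py | solution
-- ===== SOURCE A (Python) =====
-- def solution(storey):
--     answer = 0
--     lis = list(str(storey))[::-1]
--     lis = list(map(int, lis))
--     ln = len(lis)
--     for i in range(ln):
--         if lis[i] == 5:
--             answer += 5
--             if i != ln - 1:
--                 if lis[i+1] >= 5:
--                     lis[i+1] += 1
--         elif lis[i] > 5:
--             answer += (10 - lis[i])
--             if i == ln - 1:
--                 answer += 1
--             else:
--                 lis[i+1] += 1
--         else:
--             answer += lis[i]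
--             lis[i] = 0
--     return answer
-- ===== SOURCE B (Python) =====
-- def solution(storey):
--     answer = 0
--     while storey > 0:
--         d = storey % 10
--         if d < 5 or (d == 5 and (storey // 10) % 10 < 5):
--             answer += d
--             storey //= 10
--         else:
--             answer += 10 - d
--             storey = storey // 10 + 1
--     return answer
-- ===== Notes on version B (the rewrite author's own statement) =====
-- stated objective: simpler
-- what changed: B drops A's reversed digit-character list, index loop and in-place carry mutation, and instead runs a plain arithmetic while-loop on the number itself (d = storey % 10, fold the carry into storey // 10 + 1).
import Mathlib
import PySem

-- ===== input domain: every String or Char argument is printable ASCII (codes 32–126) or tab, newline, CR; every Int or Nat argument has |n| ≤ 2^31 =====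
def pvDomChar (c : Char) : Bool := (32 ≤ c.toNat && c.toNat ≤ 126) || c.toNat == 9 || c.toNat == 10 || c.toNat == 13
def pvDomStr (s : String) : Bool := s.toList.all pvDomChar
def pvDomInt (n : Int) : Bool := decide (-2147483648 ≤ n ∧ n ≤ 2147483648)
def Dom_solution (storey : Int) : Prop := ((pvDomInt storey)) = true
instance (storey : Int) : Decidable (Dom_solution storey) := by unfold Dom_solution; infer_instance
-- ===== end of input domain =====

-- B replaces A's reversed digit-character list, index loop and in-place carry mutation by a plain
-- arithmetic while-loop on the number itself (objective: simpler, same O(number of digits) cost).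

-- ===== PORT A =====
def solution (storey : Int) : Int :=
  let lis0 := (PySem.Int.toStr storey).toList                                -- list(str(storey))
  let lis1 := (PySem.List.slice? lis0 none none (-1)).getD []                -- [::-1] (step -1 ≠ 0: never none)
  let lis : List Int := lis1.map (fun c => ((c.toNat : Int) - 48))           -- map(int, ·): exact, under Pre_ every char is a decimal digit
  let ln : Int := (lis.length : Int)
  let res := (PySem.List.pyRange 0 ln 1).foldl (fun (st : Int × List Int) i =>
    let answer := st.1
    let l := st.2
    let di := PySem.List.pyGetD l i 0
    if di = 5 then
      if i ≠ ln - 1 then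
        let dn := PySem.List.pyGetD l (i + 1) 0
        if dn ≥ 5 then (answer + 5, PySem.List.pySetD l (i + 1) (dn + 1)) else (answer + 5, l)
      else (answer + 5, l)
    else if di > 5 then
      if i = ln - 1 then (answer + (10 - di) + 1, l)
      else (answer + (10 - di), PySem.List.pySetD l (i + 1) (PySem.List.pyGetD l (i + 1) 0 + 1))
    else (answer + di, PySem.List.pySetD l i 0)) (0, lis)
  res.1

-- ===== PORT B =====
-- while storey > 0: d = storey % 10; … — structural recursion on a fuel counter that only
-- guarantees totality (fuel = storey.toNat + 1 strictly exceeds the number of iterations)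
def altGo : Nat → Int → Int → Int
  | 0, _, answer => answer
  | fuel + 1, storey, answer =>
    if storey > 0 then
      let d := PySem.Int.mod storey 10
      if d < 5 ∨ (d = 5 ∧ PySem.Int.mod (PySem.Int.floordiv storey 10) 10 < 5) then
        altGo fuel (PySem.Int.floordiv storey 10) (answer + d)
      else
        altGo fuel (PySem.Int.floordiv storey 10 + 1) (answer + (10 - d))
    else answer

def solution_alt (storey : Int) : Int := altGo (storey.toNat + 1) storey 0

-- ===== PRECONDITION & SPEC =====
-- A raises ValueError for storey < 0 (the reversed string puts '-' last and int('-') fails).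
def Pre_solution (storey : Int) : Prop := 0 ≤ storey
instance (storey : Int) : Decidable (Pre_solution storey) := by unfold Pre_solution; infer_instance
def pvWitness_solution : Int := (95)

def Spec_solution (storey : Int) (out : Int) : Prop := out = solution_alt storey
instance (storey : Int) (out : Int) : Decidable (Spec_solution storey out) := by unfold Spec_solution; infer_instance

-- ===== CLAIM (what is proved, stated in full; the proofs are below) =====
def Claim_equal_solution : Prop := ∀ (storey : Int), Dom_solution storey → Pre_solution storey → Spec_solution storey (solution storey)

-- ===== LEMMAS AND PROOFS =====

-- the loop body of A's foldl, with the captured ln made explicit (definitionally equal)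
def stepA (ln : Int) (st : Int × List Int) (i : Int) : Int × List Int :=
  let answer := st.1
  let l := st.2
  let di := PySem.List.pyGetD l i 0
  if di = 5 then
    if i ≠ ln - 1 then
      let dn := PySem.List.pyGetD l (i + 1) 0
      if dn ≥ 5 then (answer + 5, PySem.List.pySetD l (i + 1) (dn + 1)) else (answer + 5, l)
    else (answer + 5, l)
  else if di > 5 then
    if i = ln - 1 then (answer + (10 - di) + 1, l)
    else (answer + (10 - di), PySem.List.pySetD l (i + 1) (PySem.List.pyGetD l (i + 1) 0 + 1))
  else (answer + di, PySem.List.pySetD l i 0)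

-- little-endian decimal digits of a natural number (ldN 0 = [0], like str)
def ldN (n : Nat) : List Nat :=
  if h : n < 10 then [n] else n % 10 :: ldN (n / 10)
decreasing_by omega

-- value of a little-endian digit list
def valI : List Int → Int
  | [] => 0
  | d :: rest => d + 10 * valI rest

-- invariant of the still-unprocessed suffix: the head may carry (≤ 10), the tail holds raw
-- digits, and there is no leading (here: trailing) zero
def GoodL : List Int → Prop
  | [] => True
  | d :: rest => 0 ≤ d ∧ d ≤ 10 ∧ (∀ x ∈ rest, 0 ≤ x ∧ x ≤ 9) ∧ rest.getLastD 1 ≠ 0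

theorem ldN_ne_nil (n : Nat) : ldN n ≠ [] := by
  rw [ldN]; split <;> simp

theorem ldN_mem_le (n : Nat) : ∀ x ∈ ldN n, x ≤ 9 := by
  induction n using Nat.strong_induction_on with
  | _ n ih =>
    rw [ldN]
    split
    · intro x hx; simp at hx; omega
    · intro x hx
      simp at hx
      rcases hx with h | h
      · omega
      · exact ih (n / 10) (by omega) x h

theorem ldN_last (n : Nat) (h : 1 ≤ n) : ((ldN n).map (fun k : Nat => (k : Int))).getLastD 1 ≠ 0 := by
  induction n using Nat.strong_induction_on with
  | _ n ih =>
    rw [ldN]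
    split
    · simp; omega
    · have h2 := ldN_ne_nil (n / 10)
      have h3 := ih (n / 10) (by omega) (by omega)
      rcases hl : ldN (n / 10) with _ | ⟨a, l⟩
      · exact absurd hl h2
      · rw [hl] at h3
        simpa using h3

theorem valI_map_ldN (n : Nat) : valI ((ldN n).map (fun k : Nat => (k : Int))) = n := by
  induction n using Nat.strong_induction_on with
  | _ n ih =>
    rw [ldN]
    split
    · simp [valI]
    · have := ih (n / 10) (by omega)
      rw [List.map_cons, valI, this]
      omega

theorem valI_nonneg (l : List Int) (h : ∀ x ∈ l, 0 ≤ x ∧ x ≤ 9) : 0 ≤ valI l := by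
  induction l with
  | nil => simp [valI]
  | cons d rest ih =>
    have h1 := h d (by simp)
    have h2 : 0 ≤ valI rest := ih (fun x hx => h x (by simp [hx]))
    simp [valI]; omega

theorem valI_zero_nil (l : List Int) (h : ∀ x ∈ l, 0 ≤ x ∧ x ≤ 9) (hl : l.getLastD 1 ≠ 0)
    (hv : valI l = 0) : l = [] := by
  induction l with
  | nil => rfl
  | cons d rest ih =>
    have h1 := h d (by simp)
    have h2 : 0 ≤ valI rest := valI_nonneg rest (fun x hx => h x (by simp [hx]))
    simp [valI] at hv
    have hd : d = 0 ∧ valI rest = 0 := by omega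
    have : rest = [] := by
      apply ih (fun x hx => h x (by simp [hx])) ?_ hd.2
      rcases rest with _ | ⟨a, l⟩
      · simp
      · simpa using hl
    subst this
    simp [hd.1] at hl

theorem ldN_good (n : Nat) : GoodL ((ldN n).map (fun k : Nat => (k : Int))) := by
  rcases hl : ldN n with _ | ⟨d, rest⟩
  · exact trivial
  · rw [List.map_cons]
    have hmem := ldN_mem_le n
    rw [hl] at hmem
    refine ⟨by positivity, ?_, ?_, ?_⟩
    · have := hmem d (by simp); omega
    · intro x hx
      simp at hx
      obtain ⟨a, ha, rfl⟩ := hx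
      have := hmem a (by simp [ha])
      omega
    · by_cases hn : n < 10
      · have : ldN n = [n] := by rw [ldN]; simp [hn]
        rw [this] at hl
        simp at hl
        simp [hl.2]
      · -- n ≥ 10, so tail = map of ldN-tail; use ldN_last on whole list
        have h3 := ldN_last n (by omega)
        rw [hl, List.map_cons] at h3
        rcases rest with _ | ⟨b, l⟩
        · simp
        · simpa using h3

theorem toDigitsCore_eq (fuel : Nat) : ∀ n ds, n < fuel →
    Nat.toDigitsCore 10 fuel n ds = ((ldN n).reverse.map Nat.digitChar) ++ ds := by
  induction fuel with
  | zero => intro n ds h; omega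
  | succ f ih =>
    intro n ds h
    rw [Nat.toDigitsCore]
    by_cases h10 : n < 10
    · have : n / 10 = 0 := by omega
      simp only [this, if_pos rfl]
      rw [ldN]
      simp [h10, Nat.mod_eq_of_lt h10]
    · have hne : ¬ n / 10 = 0 := by omega
      simp only [if_neg hne]
      rw [ih (n / 10) _ (by omega)]
      conv_rhs => rw [ldN]
      simp [h10]

theorem c2i_digitChar (k : Nat) (h : k ≤ 9) : ((Nat.digitChar k).toNat : Int) - 48 = (k : Int) := by
  interval_cases k <;> decide

theorem digits_eq (storey : Int) (h : 0 ≤ storey) :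
    ((PySem.List.slice? (PySem.Int.toStr storey).toList none none (-1)).getD []).map
      (fun c => ((c.toNat : Int) - 48)) = (ldN storey.toNat).map (fun k : Nat => (k : Int)) := by
  rw [PySem.List.slice?_none_none_neg_one]
  rw [PySem.Int.toList_toStr]
  have hneg : ¬ storey < 0 := by omega
  rw [PySem.Int.toChars]
  simp only [if_neg hneg]
  rw [Nat.toDigits, toDigitsCore_eq _ _ _ (by omega)]
  simp only [Option.getD_some, List.append_nil, List.reverse_reverse,
    List.map_map, List.map_reverse]
  apply List.map_congr_left
  intro a ha
  exact c2i_digitChar a (ldN_mem_le _ a ha)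

theorem altGo_zero (fuel : Nat) (acc : Int) : altGo fuel 0 acc = acc := by
  cases fuel <;> simp [altGo]

theorem altGo_succ (f : Nat) (n acc : Int) (h : 0 < n) :
    altGo (f + 1) n acc =
      if PySem.Int.mod n 10 < 5 ∨ (PySem.Int.mod n 10 = 5 ∧ PySem.Int.mod (PySem.Int.floordiv n 10) 10 < 5) then
        altGo f (PySem.Int.floordiv n 10) (acc + PySem.Int.mod n 10)
      else altGo f (PySem.Int.floordiv n 10 + 1) (acc + (10 - PySem.Int.mod n 10)) := by
  simp [altGo, h]

theorem main_loop (L : Nat) : ∀ (suf pre : List Int) (acc : Int) (fuel : Nat) (ln : Int),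
    suf.length = L → ln = (pre.length : Int) + (suf.length : Int) → GoodL suf →
    (valI suf).toNat < fuel →
    ((PySem.List.pyRange (pre.length : Int) ln 1).foldl (stepA ln) (acc, pre ++ suf)).1
    = altGo fuel (valI suf) acc := by
  induction L with
  | zero =>
    intro suf pre acc fuel ln hlen hln _ _
    rw [List.length_eq_zero_iff] at hlen
    subst hlen
    simp at hln
    subst hln
    simp [pysem, valI, altGo_zero]
  | succ L ih =>
    intro suf pre acc fuel ln hlen hln hgood hfuel
    rcases suf with _ | ⟨d, rest⟩
    · simp at hlen
    obtain ⟨hd0, hd10, hdig, hlast⟩ := hgood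
    have hrl : rest.length = L := by simpa using hlen
    have hm0 : 0 ≤ valI rest := valI_nonneg rest hdig
    have hv : valI (d :: rest) = d + 10 * valI rest := rfl
    rcases fuel with _ | f
    · omega
    have hlt : ((pre.length : Nat) : Int) < ln := by
      simp only [hln, List.length_cons]; push_cast; omega
    rw [PySem.List.pyRange_one_cons hlt, List.foldl_cons]
    have hget : PySem.List.pyGetD (pre ++ d :: rest) ((pre.length : Nat) : Int) 0 = d := by
      simp [List.getD]
    rcases rest with _ | ⟨r, rt⟩
    · -- last digit
      have hmz : valI ([] : List Int) = 0 := rfl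
      have hl1 : ln = ((pre.length : Nat) : Int) + 1 := by simp [hln]
      have hrange : PySem.List.pyRange (((pre.length : Nat) : Int) + 1) ln = [] := by
        rw [hl1]; simp [pysem]
      have hie : ¬ (((pre.length : Nat) : Int) ≠ ln - 1) := by omega
      have hfx : d.toNat < f + 1 := by
        have : valI [d] = d := by simp [valI]
        omega
      by_cases hd5 : d = 5
      · subst hd5
        simp only [stepA, hget, if_pos rfl, if_neg hie, hrange, List.foldl_nil]
        have hv1 : valI [(5 : Int)] = 5 := by simp [valI]
        rw [hv1]
        rcases f with _ | f'
        · omega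
        rw [altGo_succ _ _ _ (by norm_num)]
        norm_num
        rw [altGo_zero]
      · by_cases hdgt : d > 5
        · simp only [stepA, hget, if_neg hd5, if_pos hdgt,
            if_pos (by omega : ((pre.length : Nat) : Int) = ln - 1), hrange, List.foldl_nil]
          have hv1 : valI [d] = d := by simp [valI]
          rw [hv1]
          by_cases hdt : d = 10
          · subst hdt
            rcases f with _ | f'
            · omega
            rw [altGo_succ _ _ _ (by norm_num)]
            norm_num
            rcases f' with _ | f''
            · omega
            rw [altGo_succ _ _ _ (by norm_num)]
            norm_num
            rw [altGo_zero]
          · have e1 : PySem.Int.mod d 10 = d := by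
              rw [PySem.Int.mod_eq_emod_of_pos (by norm_num)]; omega
            have e2 : PySem.Int.floordiv d 10 = 0 := by
              rw [PySem.Int.floordiv_eq_ediv_of_pos (by norm_num)]; omega
            rcases f with _ | f'
            · omega
            rw [altGo_succ _ _ _ (by omega), e1, e2]
            rw [if_neg (by omega)]
            rcases f' with _ | f''
            · omega
            rw [altGo_succ _ _ _ (by norm_num)]
            norm_num
            rw [altGo_zero]
        · simp only [stepA, hget, if_neg hd5, if_neg hdgt, hrange, List.foldl_nil]
          have hv1 : valI [d] = d := by simp [valI]
          rw [hv1]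
          by_cases hdz : d = 0
          · subst hdz; rw [altGo_zero]; ring
          · have e1 : PySem.Int.mod d 10 = d := by
              rw [PySem.Int.mod_eq_emod_of_pos (by norm_num)]; omega
            have e2 : PySem.Int.floordiv d 10 = 0 := by
              rw [PySem.Int.floordiv_eq_ediv_of_pos (by norm_num)]; omega
            rw [altGo_succ _ _ _ (by omega), e1, e2, if_pos (by omega)]
            rw [altGo_zero]
    · -- rest = r :: rt
      have hr := hdig r (by simp)
      have hvrt : 0 ≤ valI rt := valI_nonneg rt (fun x hx => hdig x (by simp [hx]))
      have hmr : valI (r :: rt) = r + 10 * valI rt := rfl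
      have hrtlast : rt.getLastD 1 ≠ 0 := by
        rcases rt with _ | ⟨b, l⟩
        · simp
        · simpa using hlast
      have hie : (((pre.length : Nat) : Int) ≠ ln - 1) := by
        simp only [hln, List.length_cons]; push_cast; omega
      have hget1 : PySem.List.pyGetD (pre ++ d :: r :: rt) (((pre.length : Nat) : Int) + 1) 0 = r := by
        rw [show (((pre.length : Nat) : Int) + 1) = ((pre.length + 1 : Nat) : Int) by push_cast; ring,
          PySem.List.pyGetD_natCast]
        simp [List.getD]
      have hset1 : ∀ v : Int, PySem.List.pySetD (pre ++ d :: r :: rt) (((pre.length : Nat) : Int) + 1) v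
          = (pre ++ [d]) ++ v :: rt := by
        intro v
        rw [PySem.List.pySetD_of_nonneg _ _ (by positivity)]
        rw [show ((pre.length : Int) + 1).toNat = pre.length + 1 by omega]
        simp
      have hset0 : PySem.List.pySetD (pre ++ d :: r :: rt) ((pre.length : Nat) : Int) 0
          = (pre ++ [0]) ++ r :: rt := by
        simp
      have hnil : pre ++ d :: r :: rt = (pre ++ [d]) ++ r :: rt := by simp
      have hmpos : 0 < valI (r :: rt) := by
        rcases lt_or_eq_of_le hm0 with h | h
        · exact h
        · exfalso
          have := valI_zero_nil (r :: rt) hdig hlast h.symm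
          simp at this
      have hIH : ∀ (suf' : List Int) (acc' : Int), suf'.length = L → GoodL suf' →
          (valI suf').toNat < f →
          ∀ x : Int,
          ((PySem.List.pyRange (((pre.length : Nat) : Int) + 1) ln 1).foldl (stepA ln)
            (acc', (pre ++ [x]) ++ suf')).1
          = altGo f (valI suf') acc' := by
        intro suf' acc' hl hg hf x
        have := ih suf' (pre ++ [x]) acc' f ln hl
          (by have h1 : suf'.length = rt.length + 1 := by rw [hl, ← hrl]; simp
              simp only [hln, List.length_append, List.length_cons, List.length_nil, h1]
              push_cast; ring) hg hf
        rwa [show (((pre ++ [x]).length : Nat) : Int) = ((pre.length : Nat) : Int) + 1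
          by simp] at this
      have hgood1 : ∀ v : Int, 0 ≤ v → v ≤ 10 → GoodL (v :: rt) :=
        fun v h1 h2 => ⟨h1, h2, fun x hx => hdig x (by simp [hx]), hrtlast⟩
      have hval1 : valI ((r + 1) :: rt) = valI (r :: rt) + 1 := by
        simp only [valI, hmr]; ring
      have hlen1 : ((r + 1) :: rt).length = L := by simpa using hrl
      have hfuel1 : (valI ((r + 1) :: rt)).toNat < f := by
        rw [hval1]; rw [hv] at hfuel; omega
      have hfuelr : (valI (r :: rt)).toNat < f := by
        rw [hv] at hfuel; omega
      by_cases hd5 : d = 5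
      · subst hd5
        have e1 : PySem.Int.mod (valI (5 :: r :: rt)) 10 = 5 := by
          rw [PySem.Int.mod_eq_emod_of_pos (by norm_num)]; rw [hv]; omega
        have e2 : PySem.Int.floordiv (valI (5 :: r :: rt)) 10 = valI (r :: rt) := by
          rw [PySem.Int.floordiv_eq_ediv_of_pos (by norm_num)]; rw [hv]; omega
        have e3 : PySem.Int.mod (valI (r :: rt)) 10 = r := by
          rw [PySem.Int.mod_eq_emod_of_pos (by norm_num)]; rw [hmr]; omega
        rw [altGo_succ _ _ _ (by rw [hv]; omega), e1, e2, e3]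
        by_cases hr5 : r ≥ 5
        · have hstep : stepA ln (acc, pre ++ 5 :: r :: rt) ((pre.length : Nat) : Int)
              = (acc + 5, pre ++ 5 :: (r + 1) :: rt) := by
            simp [stepA, hget, hget1, hie, hr5, hset1]
          rw [hstep, show pre ++ 5 :: (r + 1) :: rt = (pre ++ [5]) ++ (r + 1) :: rt by simp]
          rw [hIH ((r + 1) :: rt) (acc + 5) hlen1 (hgood1 (r + 1) (by omega) (by omega)) hfuel1 5]
          rw [if_neg (by omega), hval1]
          norm_num
        · have hstep : stepA ln (acc, pre ++ 5 :: r :: rt) ((pre.length : Nat) : Int)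
              = (acc + 5, pre ++ 5 :: r :: rt) := by
            simp [stepA, hget, hget1, hie, hr5]
          rw [hstep, show pre ++ 5 :: r :: rt = (pre ++ [5]) ++ r :: rt by simp]
          rw [hIH (r :: rt) (acc + 5) hrl (hgood1 r hr.1 (by omega)) hfuelr 5]
          rw [if_pos (by omega)]
      · by_cases hdgt : d > 5
        · have hstep : stepA ln (acc, pre ++ d :: r :: rt) ((pre.length : Nat) : Int)
              = (acc + (10 - d), pre ++ d :: (r + 1) :: rt) := by
            simp [stepA, hget, hget1, hie, hd5, hdgt, hset1,
              (by omega : ¬ ((pre.length : Nat) : Int) = ln - 1)]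
          rw [hstep, show pre ++ d :: (r + 1) :: rt = (pre ++ [d]) ++ (r + 1) :: rt by simp]
          rw [hIH ((r + 1) :: rt) (acc + (10 - d)) hlen1
            (hgood1 (r + 1) (by omega) (by omega)) hfuel1 d]
          by_cases hdt : d = 10
          · subst hdt
            have e1 : PySem.Int.mod (valI (10 :: r :: rt)) 10 = 0 := by
              rw [PySem.Int.mod_eq_emod_of_pos (by norm_num)]; rw [hv]; omega
            have e2 : PySem.Int.floordiv (valI (10 :: r :: rt)) 10 = valI (r :: rt) + 1 := by
              rw [PySem.Int.floordiv_eq_ediv_of_pos (by norm_num)]; rw [hv]; omega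
            rw [altGo_succ _ _ _ (by rw [hv]; omega), e1, e2]
            rw [if_pos (by norm_num), hval1]
            norm_num
          · have e1 : PySem.Int.mod (valI (d :: r :: rt)) 10 = d := by
              rw [PySem.Int.mod_eq_emod_of_pos (by norm_num)]; rw [hv]; omega
            have e2 : PySem.Int.floordiv (valI (d :: r :: rt)) 10 = valI (r :: rt) := by
              rw [PySem.Int.floordiv_eq_ediv_of_pos (by norm_num)]; rw [hv]; omega
            rw [altGo_succ _ _ _ (by rw [hv]; omega), e1, e2]
            rw [if_neg (by omega), hval1]
        · have hstep : stepA ln (acc, pre ++ d :: r :: rt) ((pre.length : Nat) : Int)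
              = (acc + d, pre ++ 0 :: r :: rt) := by
            simp [stepA, hget, hd5, hdgt, hset0]
          rw [hstep, show pre ++ 0 :: r :: rt = (pre ++ [0]) ++ r :: rt by simp]
          rw [hIH (r :: rt) (acc + d) hrl (hgood1 r hr.1 (by omega)) hfuelr 0]
          have e1 : PySem.Int.mod (valI (d :: r :: rt)) 10 = d := by
            rw [PySem.Int.mod_eq_emod_of_pos (by norm_num)]; rw [hv]; omega
          have e2 : PySem.Int.floordiv (valI (d :: r :: rt)) 10 = valI (r :: rt) := by
            rw [PySem.Int.floordiv_eq_ediv_of_pos (by norm_num)]; rw [hv]; omega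
          rw [altGo_succ _ _ _ (by rw [hv]; omega), e1, e2]
          rw [if_pos (by omega)]


-- ===== VERDICT (by name: the statement is the Claim_ definition above) =====
theorem solution_spec : Claim_equal_solution := by
  unfold Claim_equal_solution
  intro storey _ hpre
  unfold Pre_solution at hpre
  unfold Spec_solution
  have hD := digits_eq storey hpre
  unfold solution
  simp only [hD]
  show ((PySem.List.pyRange 0 (((ldN storey.toNat).map (fun k : Nat => (k : Int))).length : Int) 1).foldl
    (stepA (((ldN storey.toNat).map (fun k : Nat => (k : Int))).length : Int))
    (0, (ldN storey.toNat).map (fun k : Nat => (k : Int)))).1 = solution_alt storey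
  have H := main_loop ((ldN storey.toNat).map (fun k : Nat => (k : Int))).length
    ((ldN storey.toNat).map (fun k : Nat => (k : Int))) [] 0 (storey.toNat + 1)
    (((ldN storey.toNat).map (fun k : Nat => (k : Int))).length : Int) rfl (by simp)
    (ldN_good storey.toNat)
    (by rw [valI_map_ldN]; omega)
  simp only [List.length_nil, Nat.cast_zero, List.nil_append] at H
  rw [H, valI_map_ldN, Int.toNat_of_nonneg hpre]
  rfl
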